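-- pv_equiv track=rewrite | github.com/higenobu/sentiment | add-vix-diff-to-allnews.py | find_date
-- ===== SOURCE A (Python) =====
-- def find_date(sub,data):
--
--     wdate=sub.split('-')
--     wy=wdate[0]
--     wm=wdate[1]
--     wd=wdate[2]
--     sub2=wy+'-'+wm+'-'+str(int(wd)+1)
--     if (sub=='2019-12-01'):
--         sub2='2019-12-02'
--     if (sub=='2019-11-30'):
--         sub2='2019-12-02'
--     if (sub=='2019-12-07'):
--         sub2='2019-12-09'
--     if (sub=='2020-02-01'):
--         sub2='2020-02-03'
--     if (sub=='2020-02-02'):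
--         sub2='2020-02-04'
--     if (sub=='2020-02-29'):
--         sub2='2020-03-02'
--     if (sub=='2020-01-04'):
--         sub2='2020-01-06'
--     if (sub=='2020-01-05'):
--         sub2='2020-01-07'
--     if (sub=='2020-01-11'):
--         sub2='2020-01-14'
--     if (sub=='2019-12-31'):
--         sub2='2020-01-06'
--     if (sub>='2020-01-01' and sub <='2020-01-04'):
--         sub2='2020-01-06'
--     if (sub=='2020-03-01'):
--         sub2='2020-03-03'
--     if (sub=='2020-03-14'):
--         sub2='2020-03-16'
--     if (sub=='2020-03-07'):
--         sub2='2020-03-09'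
--     sub3=wy+'-'+wm+'-'+str(int(wd)+2)
--
--     for i in range(len(data)):
--         if (sub==data[i] or sub2==data[i] or sub3==data[i]):
--             #print (sub2)
--             return i
--     else:
--         print ("No vix date",sub)
--         return 0
-- ===== SOURCE B (Python) =====
-- _VIX_OVERRIDES = {
--     '2019-12-01': '2019-12-02',
--     '2019-11-30': '2019-12-02',
--     '2019-12-07': '2019-12-09',
--     '2020-02-01': '2020-02-03',
--     '2020-02-02': '2020-02-04',
--     '2020-02-29': '2020-03-02',
--     '2020-01-04': '2020-01-06',
--     '2020-01-05': '2020-01-07',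
--     '2020-01-11': '2020-01-14',
--     '2019-12-31': '2020-01-06',
--     '2020-03-01': '2020-03-03',
--     '2020-03-14': '2020-03-16',
--     '2020-03-07': '2020-03-09',
-- }
--
-- def _vix_next_day(sub, default):
--     if '2020-01-01' <= sub <= '2020-01-04':
--         return '2020-01-06'
--     return _VIX_OVERRIDES.get(sub, default)
--
-- def find_date(sub, data):
--     wy, wm, wd = sub.split('-')[:3]
--     sub2 = _vix_next_day(sub, wy + '-' + wm + '-' + str(int(wd) + 1))
--     sub3 = wy + '-' + wm + '-' + str(int(wd) + 2)
--     first = {}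
--     for i, v in enumerate(data):
--         if v not in first:
--             first[v] = i
--     idxs = [first[v] for v in (sub, sub2, sub3) if v in first]
--     if idxs:
--         return min(idxs)
--     print("No vix date", sub)
--     return 0
-- ===== Notes on version B (the rewrite author's own statement) =====
-- stated objective: alternative
-- what changed: B replaces A's early-returning linear scan with a single pass that builds a first-occurrence index dict and then takes the min over the looked-up candidate dates, and replaces A's 15-branch if-chain for sub2 with a table lookup plus one range check.
import Mathlib
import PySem

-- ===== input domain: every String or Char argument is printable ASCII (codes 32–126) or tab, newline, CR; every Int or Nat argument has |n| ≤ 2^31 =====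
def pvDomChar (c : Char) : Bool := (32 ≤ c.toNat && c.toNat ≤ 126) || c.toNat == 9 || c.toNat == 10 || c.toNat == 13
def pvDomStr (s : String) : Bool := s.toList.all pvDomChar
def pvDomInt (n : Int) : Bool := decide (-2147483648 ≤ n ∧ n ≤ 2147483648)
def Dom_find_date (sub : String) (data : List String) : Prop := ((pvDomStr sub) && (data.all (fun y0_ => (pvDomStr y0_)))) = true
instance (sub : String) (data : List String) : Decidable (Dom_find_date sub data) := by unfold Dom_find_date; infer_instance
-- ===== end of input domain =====

-- B replaces A's early-returning linear scan by one index-building pass (first-occurrence dict) followed by a min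
-- over the looked-up candidates, and A's 15-branch if-chain for sub2 by a table lookup; equivalence is about the
-- RETURN value only (the 'No vix date' print in the no-match case is identical in both Pythons).

-- ===== PORT A =====
-- A's override chain for sub2, step for step (each Python `if` reassigning sub2 is one `let`);
-- the string comparisons sub>=… / sub<=… are Python code-point order = PySem.Chars.strLt on .toList.
def find_date_sub2 (sub dflt : String) : String :=
  let sub2 := dflt
  let sub2 := if sub = "2019-12-01" then "2019-12-02" else sub2
  let sub2 := if sub = "2019-11-30" then "2019-12-02" else sub2
  let sub2 := if sub = "2019-12-07" then "2019-12-09" else sub2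
  let sub2 := if sub = "2020-02-01" then "2020-02-03" else sub2
  let sub2 := if sub = "2020-02-02" then "2020-02-04" else sub2
  let sub2 := if sub = "2020-02-29" then "2020-03-02" else sub2
  let sub2 := if sub = "2020-01-04" then "2020-01-06" else sub2
  let sub2 := if sub = "2020-01-05" then "2020-01-07" else sub2
  let sub2 := if sub = "2020-01-11" then "2020-01-14" else sub2
  let sub2 := if sub = "2019-12-31" then "2020-01-06" else sub2
  let sub2 := if PySem.Chars.strLt sub.toList "2020-01-01".toList = false ∧
                 PySem.Chars.strLt "2020-01-04".toList sub.toList = false then "2020-01-06" else sub2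
  let sub2 := if sub = "2020-03-01" then "2020-03-03" else sub2
  let sub2 := if sub = "2020-03-14" then "2020-03-16" else sub2
  let sub2 := if sub = "2020-03-07" then "2020-03-09" else sub2
  sub2

-- the `for i in range(len(data)): if …: return i` scan (i is the running index); `else: return 0`
def find_date_loop (sub sub2 sub3 : String) (data : List String) (i : Nat) : Int :=
  match data with
  | [] => 0
  | d :: rest =>
    if sub = d ∨ sub2 = d ∨ sub3 = d then (i : Int)
    else find_date_loop sub sub2 sub3 rest (i + 1)

def find_date (sub : String) (data : List String) : Int :=
  let wdate := (PySem.Str.split? sub "-").getD []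
  let wy := PySem.List.pyGetD wdate 0 ""
  let wm := PySem.List.pyGetD wdate 1 ""
  let wd := PySem.List.pyGetD wdate 2 ""
  -- int(wd): Pre_find_date excludes the ValueError case, outside it the default 0 is never used
  let wdi := (PySem.Int.ofStr? wd).getD 0
  let sub2 := find_date_sub2 sub (wy ++ "-" ++ wm ++ "-" ++ PySem.Int.toStr (wdi + 1))
  let sub3 := wy ++ "-" ++ wm ++ "-" ++ PySem.Int.toStr (wdi + 2)
  find_date_loop sub sub2 sub3 data 0

-- ===== PORT B =====
def vixOverrides : PySem.Dict String String := PySem.Dict.ofList [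
  ("2019-12-01", "2019-12-02"),
  ("2019-11-30", "2019-12-02"),
  ("2019-12-07", "2019-12-09"),
  ("2020-02-01", "2020-02-03"),
  ("2020-02-02", "2020-02-04"),
  ("2020-02-29", "2020-03-02"),
  ("2020-01-04", "2020-01-06"),
  ("2020-01-05", "2020-01-07"),
  ("2020-01-11", "2020-01-14"),
  ("2019-12-31", "2020-01-06"),
  ("2020-03-01", "2020-03-03"),
  ("2020-03-14", "2020-03-16"),
  ("2020-03-07", "2020-03-09")]

def vixNextDay (sub dflt : String) : String :=
  if PySem.Chars.strLt sub.toList "2020-01-01".toList = false ∧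
     PySem.Chars.strLt "2020-01-04".toList sub.toList = false then "2020-01-06"
  else vixOverrides.getD sub dflt

def find_date_alt (sub : String) (data : List String) : Int :=
  let parts := (PySem.Str.split? sub "-").getD []
  let wy := PySem.List.pyGetD parts 0 ""
  let wm := PySem.List.pyGetD parts 1 ""
  let wd := PySem.List.pyGetD parts 2 ""
  let wdi := (PySem.Int.ofStr? wd).getD 0
  let sub2 := vixNextDay sub (wy ++ "-" ++ wm ++ "-" ++ PySem.Int.toStr (wdi + 1))
  let sub3 := wy ++ "-" ++ wm ++ "-" ++ PySem.Int.toStr (wdi + 2)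
  -- one pass: first-occurrence index of every value
  let first := (PySem.List.enumerate data).foldl
    (fun (d : PySem.Dict String Int) p => if d.contains p.2 then d else d.insert p.2 p.1)
    PySem.Dict.empty
  let idxs := [sub, sub2, sub3].filterMap (fun v => first.get? v)
  match idxs with
  | [] => 0
  | h :: t => t.foldl min h

-- ===== PRECONDITION & SPEC =====
-- Pre_ excludes exactly the inputs where the Python raises: sub.split('-') shorter than 3 (IndexError on wdate[2] /
-- unpack ValueError) or a third field int() cannot parse (ValueError).
def Pre_find_date (sub : String) (data : List String) : Prop :=
  3 ≤ ((PySem.Str.split? sub "-").getD []).length ∧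
  (PySem.Int.ofStr? (PySem.List.pyGetD ((PySem.Str.split? sub "-").getD []) 2 "")).isSome = true
instance (sub : String) (data : List String) : Decidable (Pre_find_date sub data) := by
  unfold Pre_find_date; infer_instance
def pvWitness_find_date : String × List String := ("2020-05-11", ["2020-05-12", "2020-05-11"])

def Spec_find_date (sub : String) (data : List String) (out : Int) : Prop := out = find_date_alt sub data
instance (sub : String) (data : List String) (out : Int) : Decidable (Spec_find_date sub data out) := by
  unfold Spec_find_date; infer_instance

-- ===== CLAIM (what is proved, stated in full; the proofs are below) =====
def Claim_equal_find_date : Prop := ∀ (sub : String) (data : List String), Dom_find_date sub data → Pre_find_date sub data → Spec_find_date sub data (find_date sub data)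

-- ===== LEMMAS AND PROOFS =====
theorem pv_witness_ok :
    Dom_find_date pvWitness_find_date.1 pvWitness_find_date.2 ∧
    Pre_find_date pvWitness_find_date.1 pvWitness_find_date.2 := by decide

theorem vix_sub2_eq (sub dflt : String) : find_date_sub2 sub dflt = vixNextDay sub dflt := by
  by_cases h1 : sub = "2019-12-01"
  · subst h1; rfl
  by_cases h2 : sub = "2019-11-30"
  · subst h2; rfl
  by_cases h3 : sub = "2019-12-07"
  · subst h3; rfl
  by_cases h4 : sub = "2020-02-01"
  · subst h4; rfl
  by_cases h5 : sub = "2020-02-02"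
  · subst h5; rfl
  by_cases h6 : sub = "2020-02-29"
  · subst h6; rfl
  by_cases h7 : sub = "2020-01-04"
  · subst h7; rfl
  by_cases h8 : sub = "2020-01-05"
  · subst h8; rfl
  by_cases h9 : sub = "2020-01-11"
  · subst h9; rfl
  by_cases h10 : sub = "2019-12-31"
  · subst h10; rfl
  by_cases h11 : sub = "2020-03-01"
  · subst h11; rfl
  by_cases h12 : sub = "2020-03-14"
  · subst h12; rfl
  by_cases h13 : sub = "2020-03-07"
  · subst h13; rfl
  have hv : vixOverrides = PySem.Dict.mk [("2019-12-01", "2019-12-02"), ("2019-11-30", "2019-12-02"), ("2019-12-07", "2019-12-09"),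
      ("2020-02-01", "2020-02-03"), ("2020-02-02", "2020-02-04"), ("2020-02-29", "2020-03-02"),
      ("2020-01-04", "2020-01-06"), ("2020-01-05", "2020-01-07"), ("2020-01-11", "2020-01-14"),
      ("2019-12-31", "2020-01-06"), ("2020-03-01", "2020-03-03"), ("2020-03-14", "2020-03-16"),
      ("2020-03-07", "2020-03-09")] := by rfl
  unfold find_date_sub2 vixNextDay
  simp only [if_neg h1, if_neg h2, if_neg h3,
    if_neg h4, if_neg h5, if_neg h6, if_neg h7, if_neg h8, if_neg h9, if_neg h10, if_neg h11,
    if_neg h12, if_neg h13]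
  split_ifs with hr
  · rfl
  · simp [hv, PySem.Dict.getD, PySem.Dict.get?, Ne.symm h1, Ne.symm h2, Ne.symm h3, Ne.symm h4, Ne.symm h5,
      Ne.symm h6, Ne.symm h7, Ne.symm h8, Ne.symm h9, Ne.symm h10, Ne.symm h11, Ne.symm h12, Ne.symm h13]

theorem first_get (data : List String) (d0 : PySem.Dict String Int) (s : Int) (v : String) :
    ((PySem.List.enumerate data s).foldl
      (fun (d : PySem.Dict String Int) p => if d.contains p.2 then d else d.insert p.2 p.1) d0).get? v
    = (d0.get? v).or ((PySem.List.index? data v).map (fun k => s + (k : Int))) := by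
  induction data generalizing d0 s with
  | nil => simp [PySem.List.enumerate]
  | cons x rest ih =>
    rw [PySem.List.enumerate_cons]
    simp only [List.foldl_cons]
    rw [ih]
    by_cases hx : x = v
    · subst hx
      rw [PySem.List.index?_cons_self]
      by_cases hc : d0.contains x = true
      · rw [if_pos hc]
        rcases ho : d0.get? x with _ | w
        · rw [PySem.Dict.get?_eq_none_iff_contains] at ho; simp [ho] at hc
        · simp [ho]
      · rw [if_neg hc]
        have hn : d0.get? x = none := by
          rw [PySem.Dict.get?_eq_none_iff_contains]; simpa using hc
        rw [PySem.Dict.get?_insert_self, hn]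
        simp
    · rw [PySem.List.index?_cons_of_ne _ hx]
      have hg : (if d0.contains x = true then d0 else d0.insert x s).get? v = d0.get? v := by
        split_ifs
        · rfl
        · exact PySem.Dict.get?_insert_of_ne _ _ (Ne.symm hx)
      rw [hg]
      cases PySem.List.index? rest v with
      | none => simp
      | some a =>
        have h2 : s + 1 + (a : Int) = s + ((a : Int) + 1) := by ring
        simp [h2]

theorem foldl_min_eq_zero (t : List Nat) (a : Nat) (h : a = 0 ∨ 0 ∈ t) :
    t.foldl min a = 0 := by
  induction t generalizing a with
  | nil => simpa using h
  | cons b t ih =>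
    simp only [List.foldl_cons]
    rcases h with h | h
    · exact ih _ (Or.inl (by omega))
    · rcases List.mem_cons.mp h with h | h
      · exact ih _ (Or.inl (by omega))
      · exact ih _ (Or.inr h)

theorem min?_eq_zero_of_mem {l : List Nat} (h : 0 ∈ l) : l.min? = some 0 := by
  cases l with
  | nil => cases h
  | cons a t =>
    show some (t.foldl min a) = some 0
    rcases List.mem_cons.mp h with h | h
    · exact congrArg some (foldl_min_eq_zero t a (Or.inl h.symm))
    · exact congrArg some (foldl_min_eq_zero t a (Or.inr h))

theorem foldl_min_succ (t : List Nat) (a : Nat) :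
    (t.map (· + 1)).foldl min (a + 1) = (t.foldl min a) + 1 := by
  induction t generalizing a with
  | nil => rfl
  | cons b t ih => simp only [List.map_cons, List.foldl_cons, Nat.succ_min_succ, ih]

theorem min?_map_succ (l : List Nat) : (l.map (· + 1)).min? = l.min?.map (· + 1) := by
  cases l with
  | nil => rfl
  | cons a t =>
    show some ((t.map (· + 1)).foldl min (a + 1)) = some ((t.foldl min a) + 1)
    exact congrArg some (foldl_min_succ t a)

theorem foldl_min_cast (t : List Nat) (h : Nat) :
    (t.map (fun k : Nat => (k : Int))).foldl min (h : Int) = ((t.foldl min h : Nat) : Int) := by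
  induction t generalizing h with
  | nil => rfl
  | cons a t ih => simp only [List.map_cons, List.foldl_cons, ← Nat.cast_min, ih]

theorem filterMap_index?_min? (ts : List String) (p : String → Bool)
    (hp : ∀ d, p d = true ↔ d ∈ ts) (data : List String) :
    (ts.filterMap (fun v => PySem.List.index? data v)).min? = data.findIdx? p := by
  induction data with
  | nil =>
    rw [show ts.filterMap (fun v => PySem.List.index? ([] : List String) v) = [] from by
      simp]
    simp
  | cons x rest ih =>
    rw [List.findIdx?_cons]
    by_cases hx : p x = true
    · rw [if_pos hx]
      exact min?_eq_zero_of_mem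
        (List.mem_filterMap.mpr ⟨x, (hp x).mp hx, PySem.List.index?_cons_self x rest⟩)
    · rw [if_neg hx]
      have hcong : ∀ v ∈ ts, PySem.List.index? (x :: rest) v
          = (PySem.List.index? rest v).map (· + 1) := by
        intro v hv
        refine PySem.List.index?_cons_of_ne _ (fun he => hx ?_)
        exact (hp x).mpr (by rw [he]; exact hv)
      rw [List.filterMap_congr hcong, ← List.map_filterMap, min?_map_succ, ih]

theorem loop_eq_findIdx (sub sub2 sub3 : String) (data : List String) (i : Nat) :
    find_date_loop sub sub2 sub3 data i
    = match data.findIdx? (fun d => decide (sub = d ∨ sub2 = d ∨ sub3 = d)) with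
      | some k => ((i + k : Nat) : Int)
      | none => 0 := by
  induction data generalizing i with
  | nil => rfl
  | cons x rest ihl =>
    rw [List.findIdx?_cons]
    by_cases hx : sub = x ∨ sub2 = x ∨ sub3 = x
    · rw [find_date_loop, if_pos hx, if_pos (by simpa using hx)]
      simp
    · rw [find_date_loop, if_neg hx, if_neg (by simpa using hx), ihl]
      cases hfi : rest.findIdx? (fun d => decide (sub = d ∨ sub2 = d ∨ sub3 = d)) with
      | none => simp
      | some k =>
        simp only [Option.map_some]
        congr 1
        omega

theorem loop_eq_min (sub sub2 sub3 : String) (data : List String) :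
    find_date_loop sub sub2 sub3 data 0
    = match [sub, sub2, sub3].filterMap
        (fun v => (PySem.List.index? data v).map (fun k : Nat => (k : Int))) with
      | [] => 0
      | h :: t => t.foldl min h := by
  have hp : ∀ d, (decide (sub = d ∨ sub2 = d ∨ sub3 = d)) = true ↔ d ∈ [sub, sub2, sub3] := by
    intro d
    rw [decide_eq_true_iff]
    simp only [List.mem_cons, List.not_mem_nil, or_false]
    constructor
    · rintro (h | h | h)
      · exact Or.inl h.symm
      · exact Or.inr (Or.inl h.symm)
      · exact Or.inr (Or.inr h.symm)
    · rintro (h | h | h)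
      · exact Or.inl h.symm
      · exact Or.inr (Or.inl h.symm)
      · exact Or.inr (Or.inr h.symm)
  have h1 := filterMap_index?_min? [sub, sub2, sub3] _ hp data
  rw [loop_eq_findIdx, ← h1,
    show [sub, sub2, sub3].filterMap
        (fun v => (PySem.List.index? data v).map (fun k : Nat => (k : Int)))
      = ([sub, sub2, sub3].filterMap (fun v => PySem.List.index? data v)).map
          (fun k : Nat => (k : Int))
      from (List.map_filterMap).symm]
  rcases hL : [sub, sub2, sub3].filterMap (fun v => PySem.List.index? data v) with _ | ⟨h, t⟩
  · rfl
  · show (match (h :: t).min? with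
      | some k => ((0 + k : Nat) : Int)
      | none => 0) = (t.map (fun k : Nat => (k : Int))).foldl min (h : Int)
    rw [foldl_min_cast]
    show ((0 + (t.foldl min h) : Nat) : Int) = _
    simp

-- ===== VERDICT (by name: the statement is the Claim_ definition above) =====

theorem find_date_spec : Claim_equal_find_date := by
  intro sub data _ _
  unfold Spec_find_date find_date find_date_alt
  simp only []
  rw [vix_sub2_eq, loop_eq_min]
  have hfirst : ∀ v : String,
      ((PySem.List.enumerate data).foldl
        (fun (d : PySem.Dict String Int) p => if d.contains p.2 then d else d.insert p.2 p.1)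
        PySem.Dict.empty).get? v
      = (PySem.List.index? data v).map (fun k : Nat => (k : Int)) := by
    intro v
    rw [first_get]
    simp [PySem.Dict.get?_empty, Option.bind_eq_bind, Option.map_eq_bind]
  simp only [hfirst]
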